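-- pv_equiv track=rewrite | github.com/Raiferreira1/Estrutura-de-dados-exercicios | zero_even_numbers.py | zero_even_numbers
-- ===== SOURCE A (Python) =====
-- def zero_even_numbers(num):
--     if num < 10:
--         return 0 if num % 2 == 0 else num
--     else:
--         if num % 2 == 0:
--             return zero_even_numbers(num // 10) * 10
--
--         else:
--             return zero_even_numbers(num // 10) * 10 + num % 10
-- ===== SOURCE B (Python) =====
-- def zero_even_numbers(num):
--     if num < 10:
--         return 0 if num % 2 == 0 else num
--     s = 0
--     place = 1
--     n = num
--     while n >= 10:
--         d = n % 10
--         if d % 2 == 1: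
--             s += d * place
--         place *= 10
--         n //= 10
--     if n % 2 == 1:
--         s += n * place
--     return s
-- ===== Notes on version B (the rewrite author's own statement) =====
-- stated objective: alternative
-- what changed: Replaced the recursive digit descent with an explicit iterative loop that rebuilds the number with an accumulator and a running place value.
import Mathlib
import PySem

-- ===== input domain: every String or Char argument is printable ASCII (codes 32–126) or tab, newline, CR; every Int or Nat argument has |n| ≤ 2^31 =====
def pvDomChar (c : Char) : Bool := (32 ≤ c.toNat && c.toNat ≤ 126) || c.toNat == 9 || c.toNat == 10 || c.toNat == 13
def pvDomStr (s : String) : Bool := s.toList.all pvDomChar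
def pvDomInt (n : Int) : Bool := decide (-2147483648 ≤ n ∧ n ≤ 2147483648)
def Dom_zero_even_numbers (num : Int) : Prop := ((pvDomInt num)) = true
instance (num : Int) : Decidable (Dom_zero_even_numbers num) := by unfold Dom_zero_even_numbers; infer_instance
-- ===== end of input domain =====

-- B replaces A's recursion over digits by an explicit iterative loop with an
-- accumulator and a running place value (objective: alternative decomposition).

-- ===== PORT A =====
def zero_even_numbers (num : Int) : Int :=
  if num < 10 then
    (if PySem.Int.mod num 2 = 0 then 0 else num)
  else
    if PySem.Int.mod num 2 = 0 then
      zero_even_numbers (PySem.Int.floordiv num 10) * 10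
    else
      zero_even_numbers (PySem.Int.floordiv num 10) * 10 + PySem.Int.mod num 10
termination_by num.toNat
decreasing_by
  all_goals
    rename_i h _
    rw [PySem.Int.floordiv_eq_ediv_of_pos (by norm_num : (0:Int) < 10)]
    have hd := Int.mul_ediv_add_emod num 10
    have h1 := Int.emod_nonneg num (by norm_num : (10:Int) ≠ 0)
    have h2 := Int.emod_lt_of_pos num (by norm_num : (0:Int) < 10)
    omega

-- ===== PORT B =====
-- the while-loop of Source B: state (n, s, place)
def zenLoop (n s place : Int) : Int :=
  if 10 ≤ n then
    let d := PySem.Int.mod n 10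
    zenLoop (PySem.Int.floordiv n 10)
            (if PySem.Int.mod d 2 = 1 then s + d * place else s)
            (place * 10)
  else
    if PySem.Int.mod n 2 = 1 then s + n * place else s
termination_by n.toNat
decreasing_by
  rename_i h
  rw [PySem.Int.floordiv_eq_ediv_of_pos (by norm_num : (0:Int) < 10)]
  have hd := Int.mul_ediv_add_emod n 10
  have h1 := Int.emod_nonneg n (by norm_num : (10:Int) ≠ 0)
  have h2 := Int.emod_lt_of_pos n (by norm_num : (0:Int) < 10)
  omega

def zero_even_numbers_alt (num : Int) : Int :=
  if num < 10 then
    (if PySem.Int.mod num 2 = 0 then 0 else num)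
  else
    zenLoop num 0 1

-- ===== PRECONDITION & SPEC =====
def Spec_zero_even_numbers (num : Int) (out : Int) : Prop := out = zero_even_numbers_alt num
instance (num : Int) (out : Int) : Decidable (Spec_zero_even_numbers num out) := by
  unfold Spec_zero_even_numbers; infer_instance

-- ===== CLAIM =====
def Claim_equal_zero_even_numbers : Prop :=
  ∀ (num : Int), Dom_zero_even_numbers num → Spec_zero_even_numbers num (zero_even_numbers num)

-- ===== LEMMAS AND PROOFS =====
lemma zenLoop_eq (k : Nat) : ∀ (n s place : Int), n.toNat ≤ k → 0 ≤ n →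
    zenLoop n s place = s + place * zero_even_numbers n := by
  induction k with
  | zero =>
    intro n s place hk hn
    have hn0 : n = 0 := by omega
    subst hn0
    rw [zenLoop, zero_even_numbers]
    norm_num [PySem.Int.mod]
  | succ k ih =>
    intro n s place hk hn
    by_cases h10 : 10 ≤ n
    · -- loop step
      have hfd : PySem.Int.floordiv n 10 = n / 10 :=
        PySem.Int.floordiv_eq_ediv_of_pos (by norm_num)
      have hd := Int.mul_ediv_add_emod n 10
      have hb1 := Int.emod_nonneg n (by norm_num : (10:Int) ≠ 0)
      have hb2 := Int.emod_lt_of_pos n (by norm_num : (0:Int) < 10)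
      have hdec : (n / 10).toNat ≤ k := by omega
      rw [zenLoop, if_pos h10, zero_even_numbers, if_neg (show ¬ n < 10 by omega)]
      rw [hfd]
      rw [ih (n / 10) _ _ hdec (by omega)]
      -- parity: mod (mod n 10) 2 = mod n 2
      have hm10 : PySem.Int.mod n 10 = n % 10 :=
        PySem.Int.mod_eq_emod_of_pos (by norm_num)
      have hm2 : PySem.Int.mod n 2 = n % 2 :=
        PySem.Int.mod_eq_emod_of_pos (by norm_num)
      have hmm : PySem.Int.mod (n % 10) 2 = (n % 10) % 2 :=
        PySem.Int.mod_eq_emod_of_pos (by norm_num)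
      rw [hm10, hm2, hmm]
      have hpar : (n % 10) % 2 = n % 2 := by omega
      rw [hpar]
      by_cases he : n % 2 = 0
      · rw [if_neg (show ¬ n % 2 = 1 by omega), if_pos he]
        ring
      · rw [if_pos (show n % 2 = 1 by omega), if_neg he]
        ring
    · -- final digit
      rw [zenLoop, if_neg h10, zero_even_numbers, if_pos (show n < 10 by omega)]
      have hm2 : PySem.Int.mod n 2 = n % 2 :=
        PySem.Int.mod_eq_emod_of_pos (by norm_num)
      rw [hm2]
      by_cases he : n % 2 = 0
      · rw [if_neg (show ¬ n % 2 = 1 by omega), if_pos he]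
        ring
      · rw [if_pos (show n % 2 = 1 by omega), if_neg he]
        ring

-- ===== VERDICT =====
theorem zero_even_numbers_spec : Claim_equal_zero_even_numbers := by
  intro num _
  unfold Spec_zero_even_numbers zero_even_numbers_alt
  by_cases h : num < 10
  · rw [zero_even_numbers, if_pos h, if_pos h]
  · rw [if_neg h]
    rw [zenLoop_eq num.toNat num 0 1 le_rfl (by omega)]
    ring
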